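-- pv_equiv track=rewrite | github.com/senumulapally/DataStructures | SlidingWindow/FixedWindow.py | printfirstNumber
-- ===== SOURCE A (Python) =====
-- def printfirstNumber(nums, k):
--     low = 0
--     high = 0
--     output = []
--     n = len(nums)
--     while high < n:
--         if high-low+1 < k:
--             high = high + 1
--             continue
--
--         output.append(nums[low])
--
--         low = low + 1
--         high = high + 1
--
--     return output
-- ===== SOURCE B (Python) =====
-- def printfirstNumber(nums, k):
--     # First element of each full window of size k: one closed-form slice.
--     return nums[0 : max(0, len(nums) - k + 1)]
-- ===== Notes on version B (the rewrite author's own statement) =====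
-- stated objective: simpler
-- what changed: Replaces the two-pointer while-loop that grows then slides a window with a single closed-form slice nums[0:max(0,n-k+1)].
import Mathlib
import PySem

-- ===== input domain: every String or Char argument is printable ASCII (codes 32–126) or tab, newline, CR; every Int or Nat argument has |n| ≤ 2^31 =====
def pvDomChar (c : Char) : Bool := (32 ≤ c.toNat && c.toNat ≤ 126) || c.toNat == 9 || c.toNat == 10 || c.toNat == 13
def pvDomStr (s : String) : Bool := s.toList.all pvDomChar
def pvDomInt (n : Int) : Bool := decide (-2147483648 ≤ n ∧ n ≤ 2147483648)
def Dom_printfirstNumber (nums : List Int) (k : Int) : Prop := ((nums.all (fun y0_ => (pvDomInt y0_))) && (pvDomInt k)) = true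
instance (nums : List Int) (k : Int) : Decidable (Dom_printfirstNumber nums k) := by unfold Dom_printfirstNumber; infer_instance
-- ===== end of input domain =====

-- B replaces A's two-pointer while-loop with one closed-form slice; equal return value on all inputs (no side effects involved).

-- ===== PORT A =====
-- the while-loop of A, state (low, high, output); terminates because high increases every iteration
def pvALoop (nums : List Int) (k n : Int) (low high : Int) (output : List Int) : List Int :=
  if _h : high < n then
    if high - low + 1 < k then
      pvALoop nums k n low (high + 1) output
    else
      match PySem.List.pyGet? nums low with
      | some v => pvALoop nums k n (low + 1) (high + 1) (output ++ [v])
      | none => output        -- unreachable: 0 ≤ low ≤ high < n = len nums whenever reached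
  else output
termination_by (n - high).toNat
decreasing_by all_goals omega

def printfirstNumber (nums : List Int) (k : Int) : List Int :=
  pvALoop nums k (nums.length : Int) 0 0 []

-- ===== PORT B =====
def printfirstNumber_alt (nums : List Int) (k : Int) : List Int :=
  PySem.List.slice nums (some 0) (some (max 0 ((nums.length : Int) - k + 1)))

-- ===== PRECONDITION & SPEC =====
def Spec_printfirstNumber (nums : List Int) (k : Int) (out : List Int) : Prop := out = printfirstNumber_alt nums k
instance (nums : List Int) (k : Int) (out : List Int) : Decidable (Spec_printfirstNumber nums k out) := by unfold Spec_printfirstNumber; infer_instance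

-- ===== CLAIM (what is proved, stated in full; the proofs are below) =====
def Claim_equal_printfirstNumber : Prop := ∀ (nums : List Int) (k : Int), Dom_printfirstNumber nums k → Spec_printfirstNumber nums k (printfirstNumber nums k)

-- ===== LEMMAS AND PROOFS =====

theorem pvGet_pos (nums : List Int) (low : Int) (h0 : 0 ≤ low) (hlow : low < (nums.length : Int)) :
    PySem.List.pyGet? nums low = some (nums[low.toNat]'(by omega)) := by
  have hl : low.toNat < nums.length := by omega
  simp [PySem.List.pyGet?, PySem.List.pyIdx?, h0, hlow, List.getElem?_eq_getElem hl]

-- Loop characterisation: under the invariant 0 ≤ low ≤ high ≤ n = |nums|,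
-- the loop returns output ++ a take of the suffix starting at low.
theorem pvALoop_eq (nums : List Int) (k : Int) (fuel : Nat) (low high : Int) (output : List Int)
    (h0 : 0 ≤ low) (h1 : low ≤ high) (h2 : high ≤ (nums.length : Int))
    (hfuel : ((nums.length : Int) - high).toNat = fuel) :
    pvALoop nums k (nums.length : Int) low high output =
      output ++ (if high - low + 1 < k
                 then (nums.drop low.toNat).take ((nums.length : Int) - (low + k - 1)).toNat
                 else (nums.drop low.toNat).take ((nums.length : Int) - high).toNat) := by
  induction fuel generalizing low high output with
  | zero =>
    have hn : high = (nums.length : Int) := by omega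
    rw [pvALoop, dif_neg (by omega)]
    split_ifs with hc
    · have : ((nums.length : Int) - (low + k - 1)).toNat = 0 := by omega
      simp [this]
    · have : ((nums.length : Int) - high).toNat = 0 := by omega
      simp [this]
  | succ m ih =>
    have hlt : high < (nums.length : Int) := by omega
    rw [pvALoop, dif_pos hlt]
    split_ifs with hc
    · rw [ih low (high + 1) output h0 (by omega) (by omega) (by omega)]
      by_cases hc2 : high + 1 - low + 1 < k
      · simp [hc2]
      · have he : high + 1 = low + k - 1 := by omega
        rw [if_neg hc2, he]
    · -- window full: append nums[low], slide
      have hlow : low < (nums.length : Int) := by omega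
      have hget := pvGet_pos nums low h0 hlow
      simp only [hget]
      have ha1 : (0:Int) ≤ low + 1 := by omega
      have ha2 : low + 1 ≤ high + 1 := by omega
      have ha3 : high + 1 ≤ (nums.length : Int) := by omega
      have ha4 : ((nums.length : Int) - (high + 1)).toNat = m := by omega
      rw [ih (low + 1) (high + 1) _ ha1 ha2 ha3 ha4]
      rw [if_neg (by omega : ¬ (high + 1 - (low + 1) + 1 < k))]
      have hdrop : nums.drop low.toNat = nums[low.toNat]'(by omega) :: nums.drop (low + 1).toNat := by
        have : (low + 1).toNat = low.toNat + 1 := by omega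
        rw [this, ← List.drop_drop]
        exact (List.drop_eq_getElem_cons (by omega)).trans (by simp)
      have htk : ((nums.length : Int) - high).toNat = (((nums.length : Int) - (high + 1)).toNat) + 1 := by omega
      rw [hdrop, htk, List.take_succ_cons, List.append_assoc]
      simp

-- ===== VERDICT (by name: the statement is the Claim_ definition above) =====
theorem printfirstNumber_spec : Claim_equal_printfirstNumber := by
  intro nums k _
  unfold Spec_printfirstNumber printfirstNumber printfirstNumber_alt
  rw [pvALoop_eq nums k ((nums.length : Int)).toNat 0 0 [] le_rfl le_rfl (by positivity) (by omega)]
  have hmax : max 0 ((nums.length : Int) - k + 1) = (((nums.length : Int) - k + 1).toNat : Int) := by omega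
  rw [hmax, PySem.List.slice_zero_start, PySem.List.slice_to_natCast]
  by_cases hc : (0 : Int) - 0 + 1 < k
  · rw [if_pos hc]
    simp only [Int.toNat_zero, List.drop_zero, List.nil_append]
    congr 1
    omega
  · rw [if_neg hc]
    simp only [Int.toNat_zero, List.drop_zero, List.nil_append]
    have h1 : ((nums.length : Int) - 0).toNat = nums.length := by omega
    have h2 : nums.length ≤ ((nums.length : Int) - k + 1).toNat := by omega
    rw [h1, List.take_of_length_le h2, List.take_of_length_le (le_refl _)]
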